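-- pv_equiv track=rewrite | github.com/ckoons/BubbleSpacetimeTheory | play/toy_344_graph_subdivision_tseitin.py | subdivide_parity_system
-- ===== SOURCE A (Python) =====
-- from collections import defaultdict
--
-- def subdivide_parity_system(parity_checks, backbone):
--     """STAR subdivision: each variable has degree exactly 2.
--
--     For a variable x appearing in checks C_1,...,C_k (k > 2):
--     - Create k NEW edge variables e_1,...,e_k
--     - Replace x in C_i with e_i
--     - Add ONE hub constraint: (e_1, e_2, ..., e_k) with XOR = 0
--     - Each e_i appears in: modified C_i (1) + hub (1) = degree 2 ✓
--
--     This is the star graph subdivision: hub vertex connected to k check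
--     vertices. The edges (new variables) each have exactly 2 endpoints.
--     Topologically: vertex v replaced by star graph, preserving H₁.
--
--     Returns:
--     - new_checks: list of tuples — modified parity constraints
--     - hub_constraints: list of tuples — one hub per high-degree variable
--     - new_var_count: total number of variables
--     - subdivision_map: {original_var: [edge_vars]}
--     """
--     # Count appearances of each variable
--     var_checks = defaultdict(list)  # var -> list of (check_idx, position_in_check)
--     for ci, check in enumerate(parity_checks):
--         for pos, v in enumerate(check):
--             var_checks[v].append((ci, pos))
--
--     # Create subdivision
--     next_var_id = max(backbone.keys()) + 1 if backbone else 0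
--     subdivision_map = {}
--     new_checks = list(parity_checks)  # Start with original checks
--
--     # For each high-degree variable, star-subdivide
--     hub_constraints = []
--     for v, appearances in var_checks.items():
--         k = len(appearances)
--         if k <= 2:
--             subdivision_map[v] = [v]
--             continue
--
--         # Create k NEW edge variables (one per check appearance)
--         edge_vars = []
--         for i in range(k):
--             edge_vars.append(next_var_id)
--             next_var_id += 1
--         subdivision_map[v] = edge_vars
--
--         # Replace v in each check with the corresponding edge variable
--         for idx, (ci, pos) in enumerate(appearances):
--             check = list(new_checks[ci])
--             check[pos] = edge_vars[idx]
--             new_checks[ci] = tuple(check)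
--
--         # Add ONE hub constraint: XOR of all edge vars = 0
--         # (enforces that edge vars propagate the same value through the star)
--         hub_constraints.append(tuple(edge_vars))
--
--     return new_checks, hub_constraints, next_var_id, subdivision_map
-- ===== SOURCE B (Python) =====
-- from collections import Counter
--
-- def subdivide_parity_system(parity_checks, backbone):
--     """STAR subdivision, single-pass rebuild: count degrees once, allocate
--     edge-variable blocks in first-appearance order, then rebuild each
--     modified check exactly once with streaming per-variable counters."""
--     flat = [v for check in parity_checks for v in check]
--     deg = Counter(flat)
--     order = list(dict.fromkeys(flat))
--     next_var_id = max(backbone.keys()) + 1 if backbone else 0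
--     base = {}
--     subdivision_map = {}
--     hub_constraints = []
--     for v in order:
--         k = deg[v]
--         if k <= 2:
--             subdivision_map[v] = [v]
--         else:
--             es = list(range(next_var_id, next_var_id + k))
--             base[v] = next_var_id
--             next_var_id += k
--             subdivision_map[v] = es
--             hub_constraints.append(tuple(es))
--     seen = Counter()
--     new_checks = []
--     for check in parity_checks:
--         if any(v in base for v in check):
--             row = []
--             for v in check:
--                 if v in base:
--                     row.append(base[v] + seen[v])
--                     seen[v] += 1
--                 else:
--                     row.append(v)
--             new_checks.append(tuple(row))
--         else:
--             new_checks.append(check)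
--     return new_checks, hub_constraints, next_var_id, subdivision_map
-- ===== Notes on version B (the rewrite author's own statement) =====
-- stated objective: faster
-- what changed: Instead of grouping (check,pos) appearances per variable and rebuilding a check tuple for every single high-degree occurrence, B counts degrees once, allocates edge-variable blocks in first-appearance order, and rebuilds each modified check exactly once in a single streaming pass with per-variable counters.
import Mathlib
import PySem

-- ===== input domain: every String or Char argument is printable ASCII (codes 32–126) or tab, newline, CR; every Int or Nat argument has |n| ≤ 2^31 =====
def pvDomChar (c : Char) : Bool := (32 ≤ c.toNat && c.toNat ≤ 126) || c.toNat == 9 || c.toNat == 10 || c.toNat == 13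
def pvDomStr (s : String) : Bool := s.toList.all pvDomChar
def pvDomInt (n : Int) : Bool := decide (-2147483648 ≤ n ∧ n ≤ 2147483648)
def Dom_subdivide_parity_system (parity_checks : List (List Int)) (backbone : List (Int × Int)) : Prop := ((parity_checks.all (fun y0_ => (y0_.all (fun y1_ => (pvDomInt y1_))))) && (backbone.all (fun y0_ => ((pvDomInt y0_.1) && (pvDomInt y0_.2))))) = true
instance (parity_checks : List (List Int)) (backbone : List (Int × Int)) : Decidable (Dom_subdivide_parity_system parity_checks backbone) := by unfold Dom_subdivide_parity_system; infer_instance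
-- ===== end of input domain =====

-- B replaces A's per-variable repeated check rebuilding by one degree count, block allocation in
-- first-appearance order and a single streaming rebuild of each modified check (measured faster).
-- ===== PORT A =====
def subdivide_parity_system (parity_checks : List (List Int)) (backbone : List (Int × Int)) : List (List Int) × List (List Int) × Int × (List (Int × List Int)) :=
  -- var_checks = defaultdict(list); for ci,check in enumerate(..): for pos,v in enumerate(check): var_checks[v].append((ci,pos))
  let var_checks : PySem.Dict Int (List (Int × Int)) :=
    (PySem.List.enumerate parity_checks 0).foldl (fun d cic =>
      (PySem.List.enumerate cic.2 0).foldl (fun d pv =>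
        d.modify pv.2 [] (· ++ [(cic.1, pv.1)])) d) PySem.Dict.empty
  -- next_var_id = max(backbone.keys()) + 1 if backbone else 0
  let next0 : Int :=
    if backbone ≠ [] then
      match PySem.List.max? (PySem.Dict.ofList backbone).keys (fun x => x) with
      | some m => m + 1
      | none => 0
    else 0
  -- for v, appearances in var_checks.items(): ...
  let st := var_checks.items.foldl
    (fun (st : Int × PySem.Dict Int (List Int) × List (List Int) × List (List Int)) it =>
      let next := st.1; let submap := st.2.1; let new_checks := st.2.2.1; let hubs := st.2.2.2
      let v := it.1; let appearances := it.2
      let k := appearances.length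
      if k ≤ 2 then (next, submap.insert v [v], new_checks, hubs)
      else
        -- edge_vars = []; for i in range(k): edge_vars.append(next_var_id); next_var_id += 1
        let p := (List.range k).foldl (fun (p : List Int × Int) _ => (p.1 ++ [p.2], p.2 + 1)) ([], next)
        let edge_vars := p.1
        let next := p.2
        let submap := submap.insert v edge_vars
        -- for idx, (ci, pos) in enumerate(appearances): check = list(new_checks[ci]); check[pos] = edge_vars[idx]; new_checks[ci] = tuple(check)
        -- (indices always in range in the Python, so the total pyGetD/pySetD forms are exact here)
        let new_checks := (PySem.List.enumerate appearances 0).foldl (fun nc ia =>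
            let check := PySem.List.pyGetD nc ia.2.1 []
            let check := PySem.List.pySetD check ia.2.2 (PySem.List.pyGetD edge_vars ia.1 0)
            PySem.List.pySetD nc ia.2.1 check) new_checks
        (next, submap, new_checks, hubs ++ [edge_vars]))
    (next0, PySem.Dict.empty, parity_checks, ([] : List (List Int)))
  (st.2.2.1, st.2.2.2, st.1, st.2.1.items)

-- ===== PORT B =====
def subdivide_parity_system_alt (parity_checks : List (List Int)) (backbone : List (Int × Int)) : List (List Int) × List (List Int) × Int × (List (Int × List Int)) :=
  -- flat = [v for check in parity_checks for v in check]; deg = Counter(flat); order = list(dict.fromkeys(flat))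
  let flat := parity_checks.foldl (fun acc check => acc ++ check) []
  let deg := PySem.Dict.counter flat
  let order := PySem.List.dedup flat
  let next0 : Int :=
    if backbone ≠ [] then
      match PySem.List.max? (PySem.Dict.ofList backbone).keys (fun x => x) with
      | some m => m + 1
      | none => 0
    else 0
  -- allocation pass over first-appearance order
  let al := order.foldl
    (fun (st : Int × PySem.Dict Int Int × PySem.Dict Int (List Int) × List (List Int)) v =>
      let next := st.1; let base := st.2.1; let submap := st.2.2.1; let hubs := st.2.2.2
      let k := deg.getD v 0
      if k ≤ 2 then (next, base, submap.insert v [v], hubs)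
      else
        let es := PySem.List.pyRange next (next + k) 1
        (next + k, base.insert v next, submap.insert v es, hubs ++ [es]))
    (next0, PySem.Dict.empty, PySem.Dict.empty, ([] : List (List Int)))
  -- streaming rebuild: each modified check rebuilt once
  let p2 := parity_checks.foldl
    (fun (st : PySem.Dict Int Int × List (List Int)) check =>
      if check.any (fun v => al.2.1.contains v) then
        let q := check.foldl (fun (q : PySem.Dict Int Int × List Int) v =>
            if al.2.1.contains v then
              (q.1.modify v 0 (· + 1), q.2 ++ [al.2.1.getD v 0 + q.1.getD v 0])
            else (q.1, q.2 ++ [v])) (st.1, [])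
        (q.1, st.2 ++ [q.2])
      else (st.1, st.2 ++ [check]))
    (PySem.Dict.empty, [])
  (p2.2, al.2.2.2, al.1, al.2.2.1.items)

-- ===== PRECONDITION & SPEC =====
def Spec_subdivide_parity_system (parity_checks : List (List Int)) (backbone : List (Int × Int)) (out : List (List Int) × List (List Int) × Int × (List (Int × List Int))) : Prop := out = subdivide_parity_system_alt parity_checks backbone
instance (parity_checks : List (List Int)) (backbone : List (Int × Int)) (out : List (List Int) × List (List Int) × Int × (List (Int × List Int))) : Decidable (Spec_subdivide_parity_system parity_checks backbone out) := by unfold Spec_subdivide_parity_system; infer_instance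

-- ===== CLAIM (what is proved, stated in full; the proofs are below) =====
def Claim_equal_subdivide_parity_system : Prop := ∀ (parity_checks : List (List Int)) (backbone : List (Int × Int)), Dom_subdivide_parity_system parity_checks backbone → Spec_subdivide_parity_system parity_checks backbone (subdivide_parity_system parity_checks backbone)

-- ===== LEMMAS AND PROOFS =====

-- positions (0-based) of v in one check
def pvOcc1 (v : Int) : List Int → List Nat
  | [] => []
  | x :: t => (if x = v then [0] else []) ++ (pvOcc1 v t).map (· + 1)

-- (check index, position) pairs of all occurrences of v, row-major
def pvOccA (v : Int) : List (List Int) → List (Nat × Nat)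
  | [] => []
  | c :: r => (pvOcc1 v c).map (fun p => (0, p)) ++ (pvOccA v r).map (fun q => (q.1 + 1, q.2))

-- counter bump
def pvBump (cnt : Int → Int) (x : Int) : Int → Int := fun w => if w = x then cnt x + 1 else cnt w

-- substitution spec for one row / all rows, threading per-variable counters
def pvSrow (b : Int → Option Int) : (Int → Int) → List Int → List Int × (Int → Int)
  | cnt, [] => ([], cnt)
  | cnt, x :: t =>
    match b x with
    | some bx => let r := pvSrow b (pvBump cnt x) t; ((bx + cnt x) :: r.1, r.2)
    | none => let r := pvSrow b cnt t; (x :: r.1, r.2)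

def pvSall (b : Int → Option Int) : (Int → Int) → List (List Int) → List (List Int) × (Int → Int)
  | cnt, [] => ([], cnt)
  | cnt, c :: r =>
    let q := pvSrow b cnt c
    let z := pvSall b q.2 r
    (q.1 :: z.1, z.2)

def pvUpd (b : Int → Option Int) (v n : Int) : Int → Option Int :=
  fun w => if w = v then some n else b w

-- A's per-occurrence update, after the edge-var lookup is evaluated
def pvAppF (n : Int) (nc : List (List Int)) (ia : Int × (Int × Int)) : List (List Int) :=
  PySem.List.pySetD nc ia.2.1 (PySem.List.pySetD (PySem.List.pyGetD nc ia.2.1 []) ia.2.2 (n + ia.1))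

theorem pvSetD_natCast {α : Type} (xs : List α) (n : Nat) (v : α) :
    PySem.List.pySetD xs (n : Int) v = xs.set n v := by
  simp only [PySem.List.pySetD, PySem.List.pySet?, PySem.List.pyIdx?]
  rw [if_pos (Int.natCast_nonneg n)]
  by_cases h : (n : Int) < (xs.length : Int)
  · rw [if_pos h]; simp
  · rw [if_neg h]
    simp only [Option.map_none, Option.getD_none]
    rw [List.set_eq_of_length_le (by omega)]

theorem pvSetD_zero_cons {α : Type} (x : α) (t : List α) (v : α) :
    PySem.List.pySetD (x :: t) 0 v = v :: t := by
  have := pvSetD_natCast (x :: t) 0 v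
  simpa using this


theorem pvSetD_succ_cons {α : Type} (x : α) (t : List α) (p : Nat) (v : α) :
    PySem.List.pySetD (x :: t) ((p : Int) + 1) v = x :: PySem.List.pySetD t (p : Int) v := by
  have h1 : ((p : Int) + 1) = ((p + 1 : Nat) : Int) := by push_cast; ring
  rw [h1, pvSetD_natCast, pvSetD_natCast, List.set_cons_succ]


theorem pvGetD_succ_cons {α : Type} (x : α) (t : List α) (p : Nat) (d : α) :
    PySem.List.pyGetD (x :: t) ((p : Int) + 1) d = PySem.List.pyGetD t (p : Int) d := by
  have h1 : ((p : Int) + 1) = ((p + 1 : Nat) : Int) := by push_cast; ring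
  rw [h1, PySem.List.pyGetD_natCast, PySem.List.pyGetD_natCast, List.getD_cons_succ]


theorem pvOcc1_length (v : Int) (c : List Int) : (pvOcc1 v c).length = c.count v := by
  induction c with
  | nil => simp [pvOcc1]
  | cons x t ih =>
    simp only [pvOcc1, List.length_append, List.length_map, ih, List.count_cons]
    by_cases h : x = v <;> · simp [h, beq_iff_eq]; try omega


theorem pvOccA_length (v : Int) (P : List (List Int)) :
    (pvOccA v P).length = P.flatten.count v := by
  induction P with
  | nil => simp [pvOccA]
  | cons c r ih =>
    simp [pvOccA, pvOcc1_length, ih, List.count_append]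


-- range-building loop of A
theorem pvRangeFold (k : Nat) (n : Int) :
    (List.range k).foldl (fun (p : List Int × Int) _ => (p.1 ++ [p.2], p.2 + 1)) ([], n)
      = (PySem.List.pyRange n (n + k) 1, n + k) := by
  induction k with
  | zero => simp [PySem.List.pyRange_one_eq_nil (by omega : (n:Int) ≤ n)]
  | succ k ih =>
    rw [List.range_succ, List.foldl_append, ih]
    have : (n : Int) + (k + 1 : Nat) = (n + k) + 1 := by push_cast; ring
    rw [this, PySem.List.pyRange_one_succ_right (by omega : n ≤ n + (k:Int))]
    simp


theorem pvGetD_pyRange (n : Int) (k : Nat) (idx : Nat) (h : idx < k) :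
    PySem.List.pyGetD (PySem.List.pyRange n (n + k) 1) (idx : Int) 0 = n + idx := by
  have hl : (PySem.List.pyRange n (n + k) 1).length = k := by
    rw [PySem.List.length_pyRange_one]; omega
  rw [PySem.List.pyGetD_natCast, List.getD_eq_getElem?_getD, List.getElem?_eq_getElem (by omega)]
  simp [PySem.List.getElem_pyRange_one]


-- one-check grouping: filtered enumerate = pvOcc1 positions
theorem pvFilt1 (v : Int) (t0 : Int) (c : List Int) (s : Int) :
    ((PySem.List.enumerate c s).filter (fun pv => pv.2 == v)).map (fun pv => (t0, pv.1))
      = (pvOcc1 v c).map (fun (p : Nat) => (t0, (p : Int) + s)) := by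
  induction c generalizing s with
  | nil => simp [pvOcc1, PySem.List.enumerate_nil]
  | cons x t ih =>
    rw [PySem.List.enumerate_cons]
    by_cases h : x = v
    · rw [List.filter_cons_of_pos (by simp [h]), List.map_cons, ih]
      simp only [pvOcc1, if_pos h, List.singleton_append, List.map_cons, List.map_map]
      congr 1
      · norm_num
      · apply List.map_congr_left
        intro p _
        simp only [Function.comp_apply]
        congr 1
        push_cast
        ring
    · rw [List.filter_cons_of_neg (by simp [h]), ih]
      simp only [pvOcc1, if_neg h, List.nil_append, List.map_map]
      apply List.map_congr_left
      intro p _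
      simp only [Function.comp_apply]
      congr 1
      push_cast
      ring

-- all-checks grouping
theorem pvGroupAll (v : Int) (P : List (List Int)) (t : Int) :
    (((PySem.List.enumerate P t).flatMap
        (fun cic => (PySem.List.enumerate cic.2 0).map (fun pv => (pv.2, (cic.1, pv.1))))).filter
        (fun p => p.1 == v)).map (fun p => p.2)
      = (pvOccA v P).map (fun (q : Nat × Nat) => ((q.1 : Int) + t, (q.2 : Int))) := by
  induction P generalizing t with
  | nil => simp [pvOccA, PySem.List.enumerate_nil]
  | cons c r ih =>
    rw [PySem.List.enumerate_cons, List.flatMap_cons, List.filter_append, List.map_append]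
    rw [List.filter_map]
    have hmm : ((fun p => p.1 == v) ∘ (fun pv : Int × Int => (pv.2, ((t:Int), pv.1)))) = (fun pv : Int × Int => pv.2 == v) := by
      funext pv; rfl
    rw [hmm, List.map_map]
    have hcomp : ((fun p : Int × Int × Int => p.2) ∘ (fun pv : Int × Int => (pv.2, ((t:Int), pv.1)))) = (fun pv : Int × Int => ((t:Int), pv.1)) := by
      funext pv; rfl
    rw [hcomp, pvFilt1]
    simp only [pvOccA, List.map_append, List.map_map]
    congr 1
    · apply List.map_congr_left; intro p _; simp
    · rw [ih]
      apply List.map_congr_left; intro q _; simp; ring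


-- keys of the grouped dict: flattened values
theorem pvMapFst (P : List (List Int)) (t : Int) :
    ((PySem.List.enumerate P t).flatMap
        (fun cic => (PySem.List.enumerate cic.2 0).map (fun pv => (pv.2, (cic.1, pv.1))))).map
        (fun p => p.1) = P.flatten := by
  induction P generalizing t with
  | nil => simp [PySem.List.enumerate_nil]
  | cons c r ih =>
    rw [PySem.List.enumerate_cons, List.flatMap_cons, List.map_append, List.map_map]
    have : ((fun p : Int × Int × Int => p.1) ∘ (fun pv : Int × Int => (pv.2, ((t:Int), pv.1)))) = (fun pv : Int × Int => pv.2) := by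
      funext pv; rfl
    rw [this, PySem.List.map_snd_enumerate, ih, List.flatten_cons]


-- items of a dict with Nodup keys
theorem pvItems_eq {κ ν : Type} [BEq κ] [LawfulBEq κ] (d : PySem.Dict κ ν) (d0 : ν)
    (h : d.keys.Nodup) : d.items = d.keys.map (fun k => (k, d.getD k d0)) := by
  have h1 : d.keys.map (fun k => (k, d.getD k d0)) = d.items.map (fun p => (p.1, d.getD p.1 d0)) := by
    simp only [PySem.Dict.keys, List.map_map]
    rfl
  rw [h1]
  conv_lhs => rw [← List.map_id d.items]
  symm
  apply List.map_congr_left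
  rintro ⟨k, w⟩ hp
  simp only [id_eq]
  rw [PySem.Dict.getD_of_mem_items d hp h d0]

-- a row with no substituted variable is unchanged
theorem pvSrow_id (b : Int → Option Int) (cnt : Int → Int) (c : List Int)
    (h : ∀ x ∈ c, b x = none) : pvSrow b cnt c = (c, cnt) := by
  induction c generalizing cnt with
  | nil => rfl
  | cons x t ih =>
    have hx : b x = none := h x (by simp)
    simp only [pvSrow, hx]
    rw [ih cnt (fun y hy => h y (List.mem_cons_of_mem x hy))]

theorem pvCastShift (ps : List Nat) :
    (ps.map (· + 1)).map (fun (p : Nat) => (p : Int)) = ps.map (fun (p : Nat) => (p : Int) + 1) := by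
  rw [List.map_map]
  apply List.map_congr_left
  intro p _
  simp only [Function.comp_apply]
  push_cast
  ring

theorem pvSall_id (b : Int → Option Int) (hb : ∀ w, b w = none) :
    ∀ (P : List (List Int)) (cnt : Int → Int), pvSall b cnt P = (P, cnt) := by
  intro P
  induction P with
  | nil => intro cnt; rfl
  | cons c r ih =>
    intro cnt
    simp only [pvSall]
    rw [pvSrow_id b cnt c (fun x _ => hb x), ih]

-- tail-segment: updates aimed at later checks skip the head row
theorem pvSegTail (n : Int) (qs : List (Nat × Nat)) (j : Int) (row : List Int)
    (rest : List (List Int)) :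
    (PySem.List.enumerate (qs.map (fun (q : Nat × Nat) => ((q.1 : Int) + 1, (q.2 : Int)))) j).foldl (pvAppF n)
        (row :: rest)
      = row :: (PySem.List.enumerate (qs.map (fun (q : Nat × Nat) => ((q.1 : Int), (q.2 : Int)))) j).foldl
          (pvAppF n) rest := by
  induction qs generalizing j rest with
  | nil => simp [PySem.List.enumerate_nil]
  | cons q t ih =>
    rw [List.map_cons, PySem.List.enumerate_cons, List.foldl_cons, List.map_cons,
        PySem.List.enumerate_cons, List.foldl_cons]
    have h1 : pvAppF n (row :: rest) (j, ((q.1 : Int) + 1, (q.2 : Int)))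
        = row :: pvAppF n rest (j, ((q.1 : Int), (q.2 : Int))) := by
      simp only [pvAppF]
      rw [pvGetD_succ_cons, pvSetD_succ_cons]
    rw [h1, ih]

-- head-segment: updates aimed at the head check act on the row alone
theorem pvSegHead (n : Int) (ps : List Nat) (j : Int) (row : List Int) (rest : List (List Int)) :
    (PySem.List.enumerate (ps.map (fun (p : Nat) => ((0 : Int), (p : Int)))) j).foldl (pvAppF n)
        (row :: rest)
      = ((PySem.List.enumerate (ps.map (fun (p : Nat) => ((p : Int)))) j).foldl
          (fun r (e : Int × Int) => PySem.List.pySetD r e.2 (n + e.1)) row) :: rest := by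
  induction ps generalizing j row with
  | nil => simp [PySem.List.enumerate_nil]
  | cons p t ih =>
    rw [List.map_cons, PySem.List.enumerate_cons, List.foldl_cons, List.map_cons,
        PySem.List.enumerate_cons, List.foldl_cons]
    have h1 : pvAppF n (row :: rest) (j, ((0 : Int), (p : Int)))
        = (PySem.List.pySetD row (p : Int) (n + j)) :: rest := by
      simp only [pvAppF]
      rw [PySem.List.pyGetD_zero_cons, pvSetD_zero_cons]
    rw [h1, ih]

-- within-row shift: positions ≥ 1 skip the head element
theorem pvRowShift (n : Int) (ps : List Nat) (j : Int) (y : Int) (r : List Int) :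
    (PySem.List.enumerate (ps.map (fun (p : Nat) => ((p : Int) + 1))) j).foldl
        (fun r (e : Int × Int) => PySem.List.pySetD r e.2 (n + e.1)) (y :: r)
      = y :: (PySem.List.enumerate (ps.map (fun (p : Nat) => ((p : Int)))) j).foldl
          (fun r (e : Int × Int) => PySem.List.pySetD r e.2 (n + e.1)) r := by
  induction ps generalizing j r with
  | nil => simp [PySem.List.enumerate_nil]
  | cons p t ih =>
    rw [List.map_cons, PySem.List.enumerate_cons, List.foldl_cons, List.map_cons,
        PySem.List.enumerate_cons, List.foldl_cons]
    rw [pvSetD_succ_cons, ih]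

-- heart, row level: setting v's positions turns pvSrow-without-v into pvSrow-with-v
theorem pvRowSet (v n : Int) (b : Int → Option Int) (hbv : b v = none) :
    ∀ (c : List Int) (cntB cntU : Int → Int) (j : Int),
      (∀ w, w ≠ v → cntU w = cntB w) → cntU v = j →
      ((PySem.List.enumerate ((pvOcc1 v c).map (fun (p : Nat) => ((p : Int)))) j).foldl
          (fun r (e : Int × Int) => PySem.List.pySetD r e.2 (n + e.1)) (pvSrow b cntB c).1
        = (pvSrow (pvUpd b v n) cntU c).1)
      ∧ (∀ w, w ≠ v → (pvSrow (pvUpd b v n) cntU c).2 w = (pvSrow b cntB c).2 w)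
      ∧ (pvSrow (pvUpd b v n) cntU c).2 v = j + c.count v := by
  intro c
  induction c with
  | nil =>
    intro cntB cntU j hne hv
    refine ⟨by simp [pvSrow, pvOcc1, PySem.List.enumerate_nil], fun w hw => hne w hw,
      by simp [pvSrow, hv]⟩
  | cons x t ih =>
    intro cntB cntU j hne hv
    by_cases hx : x = v
    · subst hx
      have hu : pvUpd b x n x = some n := by simp [pvUpd]
      simp only [pvSrow, hbv, hu, pvOcc1, if_true, List.singleton_append,
        List.map_cons, Nat.cast_zero, pvCastShift, PySem.List.enumerate_cons, List.foldl_cons]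
      have hne' : ∀ w, w ≠ x → pvBump cntU x w = cntB w := by
        intro w hw
        simp only [pvBump, if_neg hw]
        exact hne w hw
      have hv' : pvBump cntU x x = j + 1 := by simp [pvBump, hv]
      obtain ⟨ih1, ih2, ih3⟩ := ih cntB (pvBump cntU x) (j + 1) hne' hv'
      refine ⟨?_, ?_, ?_⟩
      · rw [pvSetD_zero_cons, pvRowShift, ih1, hv]
      · intro w hw
        exact ih2 w hw
      · rw [ih3, List.count_cons_self]
        push_cast
        ring
    · have hu : pvUpd b v n x = b x := by simp [pvUpd, hx]
      have hcnt : cntU x = cntB x := hne x hx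
      have hshift : (pvOcc1 v (x :: t)).map (fun (p : Nat) => (p : Int))
          = (pvOcc1 v t).map (fun (p : Nat) => (p : Int) + 1) := by
        simp only [pvOcc1, if_neg hx, List.nil_append, pvCastShift]
      cases hbx : b x with
      | none =>
        simp only [pvSrow, hu, hbx, hshift]
        obtain ⟨ih1, ih2, ih3⟩ := ih cntB cntU j hne hv
        refine ⟨?_, ?_, ?_⟩
        · rw [pvRowShift, ih1]
        · intro w hw; exact ih2 w hw
        · rw [ih3, List.count_cons_of_ne hx]
      | some bx =>
        simp only [pvSrow, hu, hbx, hshift]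
        have hne' : ∀ w, w ≠ v → pvBump cntU x w = pvBump cntB x w := by
          intro w hw
          simp only [pvBump, hcnt]
          split_ifs <;> [rfl; exact hne w hw]
        have hv' : pvBump cntU x v = j := by
          simp only [pvBump, if_neg (Ne.symm hx)]
          exact hv
        obtain ⟨ih1, ih2, ih3⟩ := ih (pvBump cntB x) (pvBump cntU x) j hne' hv'
        refine ⟨?_, ?_, ?_⟩
        · rw [pvRowShift, ih1, hcnt]
        · intro w hw; exact ih2 w hw
        · rw [ih3, List.count_cons_of_ne hx]

-- heart, all-checks level
theorem pvSallSet (v n : Int) (b : Int → Option Int) (hbv : b v = none) :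
    ∀ (P : List (List Int)) (cntB cntU : Int → Int) (j : Int),
      (∀ w, w ≠ v → cntU w = cntB w) → cntU v = j →
      ((PySem.List.enumerate ((pvOccA v P).map (fun (q : Nat × Nat) => ((q.1 : Int), (q.2 : Int)))) j).foldl
          (pvAppF n) (pvSall b cntB P).1
        = (pvSall (pvUpd b v n) cntU P).1)
      ∧ (∀ w, w ≠ v → (pvSall (pvUpd b v n) cntU P).2 w = (pvSall b cntB P).2 w)
      ∧ (pvSall (pvUpd b v n) cntU P).2 v = j + P.flatten.count v := by
  intro P
  induction P with
  | nil =>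
    intro cntB cntU j hne hv
    refine ⟨by simp [pvSall, pvOccA, PySem.List.enumerate_nil], fun w hw => hne w hw,
      by simp [pvSall, hv]⟩
  | cons c r ih =>
    intro cntB cntU j hne hv
    have hsplit : (pvOccA v (c :: r)).map (fun (q : Nat × Nat) => ((q.1 : Int), (q.2 : Int)))
        = (pvOcc1 v c).map (fun (p : Nat) => ((0 : Int), (p : Int)))
          ++ (pvOccA v r).map (fun (q : Nat × Nat) => ((q.1 : Int) + 1, (q.2 : Int))) := by
      simp only [pvOccA, List.map_append, List.map_map]
      congr 1
    have hlen : ((pvOcc1 v c).map (fun (p : Nat) => ((0 : Int), (p : Int)))).length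
        = c.count v := by
      rw [List.length_map, pvOcc1_length]
    obtain ⟨r1, r2, r3⟩ := pvRowSet v n b hbv c cntB cntU j hne hv
    obtain ⟨ih1, ih2, ih3⟩ := ih (pvSrow b cntB c).2 (pvSrow (pvUpd b v n) cntU c).2
      (j + (c.count v : Int)) (fun w hw => r2 w hw) r3
    refine ⟨?_, ?_, ?_⟩
    · show (PySem.List.enumerate _ j).foldl (pvAppF n)
          ((pvSrow b cntB c).1 :: (pvSall b (pvSrow b cntB c).2 r).1) = _
      rw [hsplit, PySem.List.enumerate_append, List.foldl_append, hlen, pvSegHead, r1,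
        pvSegTail, ih1]
      rfl
    · intro w hw
      show (pvSall (pvUpd b v n) (pvSrow (pvUpd b v n) cntU c).2 r).2 w
          = (pvSall b (pvSrow b cntB c).2 r).2 w
      exact ih2 w hw
    · show (pvSall (pvUpd b v n) (pvSrow (pvUpd b v n) cntU c).2 r).2 v = _
      rw [ih3, List.flatten_cons, List.count_append]
      push_cast
      ring

-- B inner row loop = pvSrow
theorem pvBRow (base : PySem.Dict Int Int) (c : List Int) :
    ∀ (seen : PySem.Dict Int Int) (row : List Int) (cnt : Int → Int),
      (∀ w, seen.getD w 0 = cnt w) →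
      (c.foldl (fun (q : PySem.Dict Int Int × List Int) v =>
          if base.contains v then
            (q.1.modify v 0 (· + 1), q.2 ++ [base.getD v 0 + q.1.getD v 0])
          else (q.1, q.2 ++ [v])) (seen, row)).2
        = row ++ (pvSrow (fun w => base.get? w) cnt c).1
      ∧ (∀ w, (c.foldl (fun (q : PySem.Dict Int Int × List Int) v =>
          if base.contains v then
            (q.1.modify v 0 (· + 1), q.2 ++ [base.getD v 0 + q.1.getD v 0])
          else (q.1, q.2 ++ [v])) (seen, row)).1.getD w 0
            = (pvSrow (fun w => base.get? w) cnt c).2 w)  := by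
  induction c with
  | nil => intro seen row cnt hc; exact ⟨by simp [pvSrow], fun w => by simpa [pvSrow] using hc w⟩
  | cons x t ih =>
    intro seen row cnt hc
    rw [List.foldl_cons]
    by_cases hx : base.contains x
    · have hsome : base.get? x = some (base.getD x 0) := by
        have h1 := PySem.Dict.contains_eq_isSome_get? base x
        rw [hx] at h1
        cases h2 : base.get? x with
        | none => rw [h2] at h1; simp at h1
        | some w => rw [PySem.Dict.getD_eq_get?_getD, h2]; rfl
      have hcnt' : ∀ w, (seen.modify x 0 (· + 1)).getD w 0 = pvBump cnt x w := by
        intro w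
        rw [PySem.Dict.getD_modify]
        simp only [pvBump, hc x, hc w]
      simp only [if_pos hx]
      obtain ⟨h1, h2⟩ := ih (seen.modify x 0 (· + 1)) (row ++ [base.getD x 0 + seen.getD x 0])
        (pvBump cnt x) hcnt'
      simp only [pvSrow, hsome]
      refine ⟨?_, fun w => ?_⟩
      · rw [h1, hc x]
        simp [List.append_assoc]
      · exact h2 w
    · have hnone : base.get? x = none := by
        cases h2 : base.get? x with
        | none => rfl
        | some w =>
          have h1 := PySem.Dict.contains_eq_isSome_get? base x
          rw [h2] at h1
          simp at h1
          exact absurd h1 hx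
      simp only [if_neg hx]
      obtain ⟨h1, h2⟩ := ih seen (row ++ [x]) cnt hc
      simp only [pvSrow, hnone]
      refine ⟨?_, fun w => ?_⟩
      · rw [h1]
        simp [List.append_assoc]
      · exact h2 w

-- B outer pass = pvSall
theorem pvBPass (base : PySem.Dict Int Int) :
    ∀ (P : List (List Int)) (seen : PySem.Dict Int Int) (out : List (List Int)) (cnt : Int → Int),
      (∀ w, seen.getD w 0 = cnt w) →
      (P.foldl (fun (st : PySem.Dict Int Int × List (List Int)) check =>
          if check.any (fun v => base.contains v) then
            let q := check.foldl (fun (q : PySem.Dict Int Int × List Int) v =>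
                if base.contains v then
                  (q.1.modify v 0 (· + 1), q.2 ++ [base.getD v 0 + q.1.getD v 0])
                else (q.1, q.2 ++ [v])) (st.1, [])
            (q.1, st.2 ++ [q.2])
          else (st.1, st.2 ++ [check])) (seen, out)).2
        = out ++ (pvSall (fun w => base.get? w) cnt P).1 := by
  intro P
  induction P with
  | nil => intro seen out cnt hc; simp [pvSall]
  | cons c r ih =>
    intro seen out cnt hc
    rw [List.foldl_cons]
    by_cases hany : c.any (fun v => base.contains v)
    · obtain ⟨h1, h2⟩ := pvBRow base c seen [] cnt hc
      simp only [if_pos hany]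
      rw [ih _ _ ((pvSrow (fun w => base.get? w) cnt c).2) h2]
      simp only [pvSall]
      rw [h1]
      simp
    · have hid : pvSrow (fun w => base.get? w) cnt c = (c, cnt) := by
        apply pvSrow_id
        intro x hxc
        have h1 := PySem.Dict.contains_eq_isSome_get? base x
        rw [Bool.not_eq_true, List.any_eq_false] at hany
        have h2 := hany x hxc
        cases h3 : base.get? x with
        | none => rfl
        | some w => rw [h3] at h1; simp at h1; rw [h1] at h2; simp at h2
      simp only [if_neg hany]
      rw [ih _ _ cnt hc]
      simp only [pvSall, hid]
      simp

-- A's main loop (exactly the port's fold function)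
def pvFoldA (st0 : Int × PySem.Dict Int (List Int) × List (List Int) × List (List Int))
    (l : List (Int × List (Int × Int))) :
    Int × PySem.Dict Int (List Int) × List (List Int) × List (List Int) :=
  l.foldl
    (fun (st : Int × PySem.Dict Int (List Int) × List (List Int) × List (List Int)) it =>
      let next := st.1; let submap := st.2.1; let new_checks := st.2.2.1; let hubs := st.2.2.2
      let v := it.1; let appearances := it.2
      let k := appearances.length
      if k ≤ 2 then (next, submap.insert v [v], new_checks, hubs)
      else
        let p := (List.range k).foldl (fun (p : List Int × Int) _ => (p.1 ++ [p.2], p.2 + 1)) ([], next)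
        let edge_vars := p.1
        let next := p.2
        let submap := submap.insert v edge_vars
        let new_checks := (PySem.List.enumerate appearances 0).foldl (fun nc ia =>
            let check := PySem.List.pyGetD nc ia.2.1 []
            let check := PySem.List.pySetD check ia.2.2 (PySem.List.pyGetD edge_vars ia.1 0)
            PySem.List.pySetD nc ia.2.1 check) new_checks
        (next, submap, new_checks, hubs ++ [edge_vars])) st0

-- B's allocation loop with the degree dict replaced by the bare count
def pvFoldB (P : List (List Int))
    (st0 : Int × PySem.Dict Int Int × PySem.Dict Int (List Int) × List (List Int))
    (l : List Int) :
    Int × PySem.Dict Int Int × PySem.Dict Int (List Int) × List (List Int) :=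
  l.foldl
    (fun (st : Int × PySem.Dict Int Int × PySem.Dict Int (List Int) × List (List Int)) v =>
      let next := st.1; let base := st.2.1; let submap := st.2.2.1; let hubs := st.2.2.2
      let k : Int := (P.flatten.count v : Int)
      if k ≤ 2 then (next, base, submap.insert v [v], hubs)
      else
        let es := PySem.List.pyRange next (next + k) 1
        (next + k, base.insert v next, submap.insert v es, hubs ++ [es])) st0

-- coupled main induction: A's per-variable loop vs B's allocation loop + pvSall
theorem pvMain (P : List (List Int)) :
    ∀ (l : List Int) (next : Int) (submap : PySem.Dict Int (List Int))
      (hubs : List (List Int)) (base : PySem.Dict Int Int),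
      l.Nodup → (∀ w ∈ l, base.get? w = none) →
      (pvFoldA (next, submap, (pvSall (fun w => base.get? w) (fun _ => 0) P).1, hubs)
          (l.map (fun v => (v, (pvOccA v P).map (fun (q : Nat × Nat) => ((q.1 : Int), (q.2 : Int)))))) ).1
        = (pvFoldB P (next, base, submap, hubs) l).1
      ∧ (pvFoldA (next, submap, (pvSall (fun w => base.get? w) (fun _ => 0) P).1, hubs)
          (l.map (fun v => (v, (pvOccA v P).map (fun (q : Nat × Nat) => ((q.1 : Int), (q.2 : Int)))))) ).2.1
        = (pvFoldB P (next, base, submap, hubs) l).2.2.1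
      ∧ (pvFoldA (next, submap, (pvSall (fun w => base.get? w) (fun _ => 0) P).1, hubs)
          (l.map (fun v => (v, (pvOccA v P).map (fun (q : Nat × Nat) => ((q.1 : Int), (q.2 : Int)))))) ).2.2.1
        = (pvSall (fun w => (pvFoldB P (next, base, submap, hubs) l).2.1.get? w) (fun _ => 0) P).1
      ∧ (pvFoldA (next, submap, (pvSall (fun w => base.get? w) (fun _ => 0) P).1, hubs)
          (l.map (fun v => (v, (pvOccA v P).map (fun (q : Nat × Nat) => ((q.1 : Int), (q.2 : Int)))))) ).2.2.2
        = (pvFoldB P (next, base, submap, hubs) l).2.2.2 := by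
  intro l
  induction l with
  | nil =>
    intro next submap hubs base _ _
    exact ⟨rfl, rfl, rfl, rfl⟩
  | cons v l ih =>
    intro next submap hubs base hnd hbase
    have hv : base.get? v = none := hbase v (List.mem_cons_self)
    have hvl : v ∉ l := (List.nodup_cons.mp hnd).1
    have hnd' : l.Nodup := (List.nodup_cons.mp hnd).2
    simp only [pvFoldA, pvFoldB] at ih ⊢
    rw [List.map_cons]
    simp only [List.foldl_cons]
    have hlen : ((pvOccA v P).map (fun (q : Nat × Nat) => ((q.1 : Int), (q.2 : Int)))).length
        = P.flatten.count v := by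
      rw [List.length_map, pvOccA_length]
    rw [hlen]
    by_cases hk2 : P.flatten.count v ≤ 2
    · rw [if_pos hk2, if_pos (by exact_mod_cast hk2)]
      exact ih next (submap.insert v [v]) hubs base hnd'
        (fun w hw => hbase w (List.mem_cons_of_mem v hw))
    · rw [if_neg hk2, if_neg (by exact_mod_cast hk2)]
      rw [pvRangeFold (P.flatten.count v) next]
      have hcong : ∀ (nc0 : List (List Int)),
          (PySem.List.enumerate ((pvOccA v P).map (fun (q : Nat × Nat) => ((q.1 : Int), (q.2 : Int)))) 0).foldl
            (fun nc ia => PySem.List.pySetD nc ia.2.1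
              (PySem.List.pySetD (PySem.List.pyGetD nc ia.2.1 []) ia.2.2
                (PySem.List.pyGetD
                  (PySem.List.pyRange next (next + (P.flatten.count v : Int)) 1) ia.1 0))) nc0
          = (PySem.List.enumerate ((pvOccA v P).map (fun (q : Nat × Nat) => ((q.1 : Int), (q.2 : Int)))) 0).foldl
              (pvAppF next) nc0 := by
        intro nc0
        apply PySem.List.foldl_congr_mem
        intro acc x hx
        rw [PySem.List.mem_enumerate_iff] at hx
        obtain ⟨kk, hkk, hxeq⟩ := hx
        subst hxeq
        simp only [pvAppF, zero_add]
        rw [pvGetD_pyRange next (P.flatten.count v) kk (by rw [← hlen]; exact hkk)]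
      rw [hcong]
      have hset := (pvSallSet v next (fun w => base.get? w) hv P (fun _ => 0) (fun _ => 0) 0
        (fun _ _ => rfl) rfl).1
      rw [hset]
      have hupd : pvUpd (fun w => base.get? w) v next
          = (fun w => (base.insert v next).get? w) := by
        funext w
        rw [PySem.Dict.get?_insert]
        rfl
      rw [hupd]
      exact ih (next + (P.flatten.count v : Int))
        (submap.insert v (PySem.List.pyRange next (next + (P.flatten.count v : Int)) 1))
        (hubs ++ [PySem.List.pyRange next (next + (P.flatten.count v : Int)) 1])
        (base.insert v next) hnd'
        (fun w hw => by
          rw [PySem.Dict.get?_insert]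
          rw [if_neg (by rintro rfl; exact hvl hw)]
          exact hbase w (List.mem_cons_of_mem v hw))

-- ===== VERDICT (by name: the statement is the Claim_ definition above) =====
theorem subdivide_parity_system_spec : Claim_equal_subdivide_parity_system := by
  intro P backbone _
  unfold Spec_subdivide_parity_system
  simp only [subdivide_parity_system, subdivide_parity_system_alt]
  -- B's flat list is the flattened checks, and its order is the first-appearance set
  rw [PySem.List.foldl_append_eq_flatten, List.nil_append, PySem.List.dedup_eq_ofList]
  -- A's grouping dict, rewritten as a single fold over all (var, (check, pos)) triples
  have hvc : ((PySem.List.enumerate P 0).foldl (fun d cic =>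
        (PySem.List.enumerate cic.2 0).foldl (fun d pv =>
          d.modify pv.2 [] (· ++ [(cic.1, pv.1)])) d) PySem.Dict.empty)
      = ((PySem.List.enumerate P 0).flatMap (fun cic => (PySem.List.enumerate cic.2 0).map
            (fun pv => (pv.2, (cic.1, pv.1))))).foldl
          (fun d p => d.modify p.1 [] (· ++ [p.2])) PySem.Dict.empty := by
    rw [List.foldl_flatMap]
    apply PySem.List.foldl_congr_mem
    intro acc x _
    rw [List.foldl_map]
  rw [hvc]
  have hkeys : (((PySem.List.enumerate P 0).flatMap (fun cic => (PySem.List.enumerate cic.2 0).map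
            (fun pv => (pv.2, (cic.1, pv.1))))).foldl
          (fun d p => d.modify p.1 [] (· ++ [p.2])) PySem.Dict.empty).keys
      = PySem.Set.ofList P.flatten := by
    rw [PySem.Dict.keys_foldl_modify_key _ (fun (p : Int × (Int × Int)) => p.1) []
      (fun _ (p : Int × (Int × Int)) => (· ++ [p.2])) PySem.Dict.empty]
    rw [PySem.Dict.keys_empty, PySem.Set.update_nil_left, pvMapFst]
  have hnodup : (((PySem.List.enumerate P 0).flatMap (fun cic => (PySem.List.enumerate cic.2 0).map
            (fun pv => (pv.2, (cic.1, pv.1))))).foldl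
          (fun d p => d.modify p.1 [] (· ++ [p.2])) PySem.Dict.empty).keys.Nodup := by
    apply PySem.Dict.nodup_keys_foldl_modify_key _ (fun (p : Int × (Int × Int)) => p.1) []
      (fun _ (p : Int × (Int × Int)) => (· ++ [p.2]))
    rw [PySem.Dict.keys_empty]
    exact List.nodup_nil
  have hgetd : ∀ v, (((PySem.List.enumerate P 0).flatMap (fun cic => (PySem.List.enumerate cic.2 0).map
            (fun pv => (pv.2, (cic.1, pv.1))))).foldl
          (fun d p => d.modify p.1 [] (· ++ [p.2])) PySem.Dict.empty).getD v []
      = (pvOccA v P).map (fun (q : Nat × Nat) => ((q.1 : Int), (q.2 : Int))) := by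
    intro v
    rw [PySem.Dict.getD_foldl_modify_append, PySem.Dict.getD_empty, List.nil_append, pvGroupAll]
    apply List.map_congr_left
    intro q _
    simp
  have hitems : (((PySem.List.enumerate P 0).flatMap (fun cic => (PySem.List.enumerate cic.2 0).map
            (fun pv => (pv.2, (cic.1, pv.1))))).foldl
          (fun d p => d.modify p.1 [] (· ++ [p.2])) PySem.Dict.empty).items
      = (PySem.Set.ofList P.flatten).map (fun v => (v,
          (pvOccA v P).map (fun (q : Nat × Nat) => ((q.1 : Int), (q.2 : Int))))) := by
    rw [pvItems_eq _ [] hnodup, hkeys]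
    apply List.map_congr_left
    intro v _
    rw [hgetd v]
  rw [hitems]
  -- B's allocation loop: replace the degree-dict lookup by the bare count
  have hBalloc : ∀ (st0 : Int × PySem.Dict Int Int × PySem.Dict Int (List Int) × List (List Int)),
      (PySem.Set.ofList P.flatten).foldl
        (fun (st : Int × PySem.Dict Int Int × PySem.Dict Int (List Int) × List (List Int)) v =>
          let next := st.1; let base := st.2.1; let submap := st.2.2.1; let hubs := st.2.2.2
          let k := (PySem.Dict.counter P.flatten).getD v 0
          if k ≤ 2 then (next, base, submap.insert v [v], hubs)
          else
            let es := PySem.List.pyRange next (next + k) 1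
            (next + k, base.insert v next, submap.insert v es, hubs ++ [es])) st0
      = (PySem.Set.ofList P.flatten).foldl
        (fun (st : Int × PySem.Dict Int Int × PySem.Dict Int (List Int) × List (List Int)) v =>
          let next := st.1; let base := st.2.1; let submap := st.2.2.1; let hubs := st.2.2.2
          let k : Int := (P.flatten.count v : Int)
          if k ≤ 2 then (next, base, submap.insert v [v], hubs)
          else
            let es := PySem.List.pyRange next (next + k) 1
            (next + k, base.insert v next, submap.insert v es, hubs ++ [es])) st0 := by
    intro st0
    apply PySem.List.foldl_congr_mem
    intro acc x _
    rw [PySem.Dict.getD_counter]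
  rw [hBalloc]
  -- the coupled main induction
  have e := pvMain P (PySem.Set.ofList P.flatten)
    (if backbone ≠ [] then
      match PySem.List.max? (PySem.Dict.ofList backbone).keys (fun x => x) with
      | some m => m + 1
      | none => 0
    else 0)
    PySem.Dict.empty [] PySem.Dict.empty (PySem.Set.nodup_ofList P.flatten)
    (fun w _ => PySem.Dict.get?_empty w)
  simp only [pvFoldA, pvFoldB] at e
  rw [pvSall_id (fun w => (PySem.Dict.empty : PySem.Dict Int Int).get? w)
    (fun w => PySem.Dict.get?_empty w) P (fun _ => 0)] at e
  obtain ⟨e1, e2, e3, e4⟩ := e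
  -- B's rebuild pass
  rw [pvBPass _ P PySem.Dict.empty [] (fun _ => 0)
    (fun w => by rw [PySem.Dict.getD_empty]), List.nil_append]
  rw [e1, e2, e3, e4]
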